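-- pv_equiv track=rewrite | github.com/sadanesa/Aljabar-Matriks | inverseadjoin.py | adjoint_matrix
-- ===== SOURCE A (Python) =====
-- def matrix_minor(matrix, i, j):
--     """Mengembalikan matriks minor dengan menghapus baris i dan kolom j"""
--     return [[matrix[r][c] for c in range(len(matrix)) if c != j]
--             for r in range(len(matrix)) if r != i]
--
-- def cofactor(matrix, i, j):
--     """Menghitung elemen kofaktor pada posisi (i, j)"""
--     minor_matrix = matrix_minor(matrix, i, j)
--     # Determinan matriks 2x2 [a, b; c, d] adalah ad - bc
--     minor_det = minor_matrix[0][0] * minor_matrix[1][1] - minor_matrix[0][1] * minor_matrix[1][0]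
--     return ((-1) ** (i + j)) * minor_det
--
-- def adjoint_matrix(matrix):
--     """Menghitung matriks adjoin (transpos dari matriks kofaktor)"""
--     cofactor_matrix = []
--     for i in range(3):
--         cofactor_row = []
--         for j in range(3):
--             cofactor_row.append(cofactor(matrix, i, j))
--         cofactor_matrix.append(cofactor_row)
--
--     # Transpose matriks kofaktor untuk mendapatkan adjoin
--     adjoint = []
--     for j in range(3):
--         adjoint_row = []
--         for i in range(3):
--             adjoint_row.append(cofactor_matrix[i][j])
--         adjoint.append(adjoint_row)
--
--     return adjoint
-- ===== SOURCE B (Python) =====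
-- def adjoint_matrix(matrix):
--     """Adjoint of a 3x3 matrix as a direct closed form (no minors/transpose loops)."""
--     r0, r1, r2 = matrix[0], matrix[1], matrix[2]
--     a, b, c = r0[0], r0[1], r0[2]
--     d, e, f = r1[0], r1[1], r1[2]
--     g, h, i = r2[0], r2[1], r2[2]
--     return [[e*i - f*h, c*h - b*i, b*f - c*e],
--             [f*g - d*i, a*i - c*g, c*d - a*f],
--             [d*h - e*g, b*g - a*h, a*e - b*d]]
-- ===== Notes on version B (the rewrite author's own statement) =====
-- stated objective: simpler
-- what changed: B replaces A's minor-construction, per-entry cofactor computation and transpose loop by a single closed-form 3x3 adjugate built directly from the nine top-left matrix entries.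
import Mathlib
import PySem

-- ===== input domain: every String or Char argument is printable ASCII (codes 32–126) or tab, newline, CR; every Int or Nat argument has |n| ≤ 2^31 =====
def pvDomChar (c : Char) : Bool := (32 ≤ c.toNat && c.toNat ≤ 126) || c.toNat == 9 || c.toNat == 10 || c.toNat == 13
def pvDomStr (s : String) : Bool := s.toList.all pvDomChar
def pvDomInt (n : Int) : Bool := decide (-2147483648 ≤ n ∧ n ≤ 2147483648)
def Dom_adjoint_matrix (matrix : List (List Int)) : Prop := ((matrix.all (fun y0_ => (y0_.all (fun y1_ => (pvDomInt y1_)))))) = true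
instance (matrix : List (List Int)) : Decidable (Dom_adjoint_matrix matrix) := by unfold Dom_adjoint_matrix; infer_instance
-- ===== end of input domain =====

-- B changes only the decomposition (closed-form adjugate instead of minors+transpose); same values. Objective: simpler.

-- ===== PORT A =====
def pv_matrix_minor (matrix : List (List Int)) (i j : Int) : List (List Int) :=
  ((PySem.List.pyRange 0 (matrix.length : Int) 1).filter (fun r => r != i)).map
    (fun r => ((PySem.List.pyRange 0 (matrix.length : Int) 1).filter (fun c => c != j)).map
      (fun c => PySem.List.pyGetD (PySem.List.pyGetD matrix r []) c 0))

def pv_cofactor (matrix : List (List Int)) (i j : Int) : Int :=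
  let m := pv_matrix_minor matrix i j
  let minor_det :=
    PySem.List.pyGetD (PySem.List.pyGetD m 0 []) 0 0 * PySem.List.pyGetD (PySem.List.pyGetD m 1 []) 1 0
    - PySem.List.pyGetD (PySem.List.pyGetD m 0 []) 1 0 * PySem.List.pyGetD (PySem.List.pyGetD m 1 []) 0 0
  ((-1 : Int) ^ (i + j).toNat) * minor_det

def adjoint_matrix (matrix : List (List Int)) : List (List Int) :=
  let cofactor_matrix := (PySem.List.pyRange 0 3 1).foldl (fun acc i =>
      acc ++ [(PySem.List.pyRange 0 3 1).foldl (fun row j => row ++ [pv_cofactor matrix i j]) []]) []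
  (PySem.List.pyRange 0 3 1).foldl (fun adj j =>
      adj ++ [(PySem.List.pyRange 0 3 1).foldl (fun row i =>
        row ++ [PySem.List.pyGetD (PySem.List.pyGetD cofactor_matrix i []) j 0]) []]) []

-- ===== PORT B =====
def adjoint_matrix_alt (matrix : List (List Int)) : List (List Int) :=
  let r0 := PySem.List.pyGetD matrix 0 []
  let r1 := PySem.List.pyGetD matrix 1 []
  let r2 := PySem.List.pyGetD matrix 2 []
  let a := PySem.List.pyGetD r0 0 0; let b := PySem.List.pyGetD r0 1 0; let c := PySem.List.pyGetD r0 2 0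
  let d := PySem.List.pyGetD r1 0 0; let e := PySem.List.pyGetD r1 1 0; let f := PySem.List.pyGetD r1 2 0
  let g := PySem.List.pyGetD r2 0 0; let h := PySem.List.pyGetD r2 1 0; let i := PySem.List.pyGetD r2 2 0
  [[e*i - f*h, c*h - b*i, b*f - c*e],
   [f*g - d*i, a*i - c*g, c*d - a*f],
   [d*h - e*g, b*g - a*h, a*e - b*d]]

-- ===== PRECONDITION & SPEC =====
-- Pre_ is exactly the inputs A returns on: at least 3 rows, every row at least as long as the
-- number of rows (otherwise A's minor comprehension or the 2x2-det indexing raises IndexError).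
def Pre_adjoint_matrix (matrix : List (List Int)) : Prop :=
  3 ≤ matrix.length ∧ ∀ row ∈ matrix, matrix.length ≤ row.length
instance (matrix : List (List Int)) : Decidable (Pre_adjoint_matrix matrix) := by
  unfold Pre_adjoint_matrix; infer_instance

def pvWitness_adjoint_matrix : List (List Int) := [[1,2,3],[4,5,6],[7,8,10]]

def Spec_adjoint_matrix (matrix : List (List Int)) (out : List (List Int)) : Prop := out = adjoint_matrix_alt matrix
instance (matrix : List (List Int)) (out : List (List Int)) : Decidable (Spec_adjoint_matrix matrix out) := by unfold Spec_adjoint_matrix; infer_instance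

-- ===== CLAIM (what is proved, stated in full; the proofs are below) =====
def Claim_equal_adjoint_matrix : Prop := ∀ (matrix : List (List Int)), Dom_adjoint_matrix matrix → Pre_adjoint_matrix matrix → Spec_adjoint_matrix matrix (adjoint_matrix matrix)

-- ===== LEMMAS AND PROOFS =====

lemma range_head3 (n : Nat) (h : 3 ≤ n) :
    PySem.List.pyRange 0 (n:Int) 1 = 0 :: 1 :: 2 :: PySem.List.pyRange 3 (n:Int) 1 := by
  rw [PySem.List.pyRange_one_cons (by exact_mod_cast Nat.lt_of_lt_of_le (by norm_num) h),
      PySem.List.pyRange_one_cons (by exact_mod_cast Nat.lt_of_lt_of_le (by norm_num) h),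
      PySem.List.pyRange_one_cons (by exact_mod_cast Nat.lt_of_lt_of_le (by norm_num) h)]
  norm_num

set_option maxHeartbeats 1000000 in
lemma cof00 (a0 b0 c0 a1 b1 c1 a2 b2 c2 : Int) (t0 t1 t2 : List Int) (rest : List (List Int)) :
    pv_cofactor ((a0::b0::c0::t0)::(a1::b1::c1::t1)::(a2::b2::c2::t2)::rest) 0 0
      = b1*c2 - c1*b2 := by
  have hrg := range_head3 (((a0::b0::c0::t0)::(a1::b1::c1::t1)::(a2::b2::c2::t2)::rest).length) (by simp)
  simp only [pv_cofactor, pv_matrix_minor, hrg]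
  simp [pysem]
  try ring

set_option maxHeartbeats 1000000 in
lemma cof01 (a0 b0 c0 a1 b1 c1 a2 b2 c2 : Int) (t0 t1 t2 : List Int) (rest : List (List Int)) :
    pv_cofactor ((a0::b0::c0::t0)::(a1::b1::c1::t1)::(a2::b2::c2::t2)::rest) 0 1
      = c1*a2 - a1*c2 := by
  have hrg := range_head3 (((a0::b0::c0::t0)::(a1::b1::c1::t1)::(a2::b2::c2::t2)::rest).length) (by simp)
  simp only [pv_cofactor, pv_matrix_minor, hrg]
  simp [pysem]
  try ring

set_option maxHeartbeats 1000000 in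
lemma cof02 (a0 b0 c0 a1 b1 c1 a2 b2 c2 : Int) (t0 t1 t2 : List Int) (rest : List (List Int)) :
    pv_cofactor ((a0::b0::c0::t0)::(a1::b1::c1::t1)::(a2::b2::c2::t2)::rest) 0 2
      = a1*b2 - b1*a2 := by
  have hrg := range_head3 (((a0::b0::c0::t0)::(a1::b1::c1::t1)::(a2::b2::c2::t2)::rest).length) (by simp)
  simp only [pv_cofactor, pv_matrix_minor, hrg]
  simp [pysem]
  try ring

set_option maxHeartbeats 1000000 in
lemma cof10 (a0 b0 c0 a1 b1 c1 a2 b2 c2 : Int) (t0 t1 t2 : List Int) (rest : List (List Int)) :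
    pv_cofactor ((a0::b0::c0::t0)::(a1::b1::c1::t1)::(a2::b2::c2::t2)::rest) 1 0
      = c0*b2 - b0*c2 := by
  have hrg := range_head3 (((a0::b0::c0::t0)::(a1::b1::c1::t1)::(a2::b2::c2::t2)::rest).length) (by simp)
  simp only [pv_cofactor, pv_matrix_minor, hrg]
  simp [pysem]
  try ring

set_option maxHeartbeats 1000000 in
lemma cof11 (a0 b0 c0 a1 b1 c1 a2 b2 c2 : Int) (t0 t1 t2 : List Int) (rest : List (List Int)) :
    pv_cofactor ((a0::b0::c0::t0)::(a1::b1::c1::t1)::(a2::b2::c2::t2)::rest) 1 1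
      = a0*c2 - c0*a2 := by
  have hrg := range_head3 (((a0::b0::c0::t0)::(a1::b1::c1::t1)::(a2::b2::c2::t2)::rest).length) (by simp)
  simp only [pv_cofactor, pv_matrix_minor, hrg]
  simp [pysem]
  try ring

set_option maxHeartbeats 1000000 in
lemma cof12 (a0 b0 c0 a1 b1 c1 a2 b2 c2 : Int) (t0 t1 t2 : List Int) (rest : List (List Int)) :
    pv_cofactor ((a0::b0::c0::t0)::(a1::b1::c1::t1)::(a2::b2::c2::t2)::rest) 1 2
      = b0*a2 - a0*b2 := by
  have hrg := range_head3 (((a0::b0::c0::t0)::(a1::b1::c1::t1)::(a2::b2::c2::t2)::rest).length) (by simp)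
  simp only [pv_cofactor, pv_matrix_minor, hrg]
  simp [pysem]
  try ring

set_option maxHeartbeats 1000000 in
lemma cof20 (a0 b0 c0 a1 b1 c1 a2 b2 c2 : Int) (t0 t1 t2 : List Int) (rest : List (List Int)) :
    pv_cofactor ((a0::b0::c0::t0)::(a1::b1::c1::t1)::(a2::b2::c2::t2)::rest) 2 0
      = b0*c1 - c0*b1 := by
  have hrg := range_head3 (((a0::b0::c0::t0)::(a1::b1::c1::t1)::(a2::b2::c2::t2)::rest).length) (by simp)
  simp only [pv_cofactor, pv_matrix_minor, hrg]
  simp [pysem]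
  try ring

set_option maxHeartbeats 1000000 in
lemma cof21 (a0 b0 c0 a1 b1 c1 a2 b2 c2 : Int) (t0 t1 t2 : List Int) (rest : List (List Int)) :
    pv_cofactor ((a0::b0::c0::t0)::(a1::b1::c1::t1)::(a2::b2::c2::t2)::rest) 2 1
      = c0*a1 - a0*c1 := by
  have hrg := range_head3 (((a0::b0::c0::t0)::(a1::b1::c1::t1)::(a2::b2::c2::t2)::rest).length) (by simp)
  simp only [pv_cofactor, pv_matrix_minor, hrg]
  simp [pysem]
  try ring

set_option maxHeartbeats 1000000 in
lemma cof22 (a0 b0 c0 a1 b1 c1 a2 b2 c2 : Int) (t0 t1 t2 : List Int) (rest : List (List Int)) :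
    pv_cofactor ((a0::b0::c0::t0)::(a1::b1::c1::t1)::(a2::b2::c2::t2)::rest) 2 2
      = a0*b1 - b0*a1 := by
  have hrg := range_head3 (((a0::b0::c0::t0)::(a1::b1::c1::t1)::(a2::b2::c2::t2)::rest).length) (by simp)
  simp only [pv_cofactor, pv_matrix_minor, hrg]
  simp [pysem]
  try ring

-- ===== VERDICT (by name: the statement is the Claim_ definition above) =====
set_option maxHeartbeats 2000000 in
theorem adjoint_matrix_spec : Claim_equal_adjoint_matrix := by
  intro matrix _ hpre
  obtain ⟨hlen, hrows⟩ := hpre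
  obtain ⟨R0, R1, R2, rest, rfl⟩ : ∃ a b c t, matrix = a :: b :: c :: t := by
    rcases matrix with _ | ⟨a, _ | ⟨b, _ | ⟨c, t⟩⟩⟩
    · simp at hlen
    · simp at hlen
    · simp at hlen
    · exact ⟨a, b, c, t, rfl⟩
  have h0 : 3 ≤ R0.length := le_trans (by simp) (hrows R0 (by simp))
  have h1 : 3 ≤ R1.length := le_trans (by simp) (hrows R1 (by simp))
  have h2 : 3 ≤ R2.length := le_trans (by simp) (hrows R2 (by simp))
  obtain ⟨a0, b0, c0, t0, rfl⟩ : ∃ a b c t, R0 = a :: b :: c :: t := by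
    rcases R0 with _ | ⟨a, _ | ⟨b, _ | ⟨c, t⟩⟩⟩
    · simp at h0
    · simp at h0
    · simp at h0
    · exact ⟨a, b, c, t, rfl⟩
  obtain ⟨a1, b1, c1, t1, rfl⟩ : ∃ a b c t, R1 = a :: b :: c :: t := by
    rcases R1 with _ | ⟨a, _ | ⟨b, _ | ⟨c, t⟩⟩⟩
    · simp at h1
    · simp at h1
    · simp at h1
    · exact ⟨a, b, c, t, rfl⟩
  obtain ⟨a2, b2, c2, t2, rfl⟩ : ∃ a b c t, R2 = a :: b :: c :: t := by
    rcases R2 with _ | ⟨a, _ | ⟨b, _ | ⟨c, t⟩⟩⟩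
    · simp at h2
    · simp at h2
    · simp at h2
    · exact ⟨a, b, c, t, rfl⟩
  simp only [Spec_adjoint_matrix, adjoint_matrix, adjoint_matrix_alt,
    show PySem.List.pyRange 0 3 1 = [0,1,2] from rfl, List.foldl,
    List.nil_append, List.cons_append, 
    cof00, cof01, cof02, cof10, cof11, cof12, cof20, cof21, cof22]
  simp [pysem]
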